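-- pv_equiv track=rewrite | github.com/muskan-shah-02/dokydoc | backend/app/middleware/audit_middleware.py | _extract_resource_info
-- ===== SOURCE A (Python) =====
-- def _extract_resource_info(path: str) -> tuple:
--     """Extract resource type and ID from URL path."""
--     parts = path.strip("/").split("/")
--
--     # Map URL segments to resource types
--     resource_map = {
--         "documents": "document",
--         "repositories": "repository",
--         "code-components": "code_component",
--         "initiatives": "initiative",
--         "ontology": "ontology",
--         "users": "user",
--         "webhooks": "system",
--         "tasks": "task",
--         "login": "auth",
--     }
--
--     resource_type = "unknown"
--     resource_id = None
--
--     for part in parts: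
--         if part in resource_map:
--             resource_type = resource_map[part]
--         elif part.isdigit():
--             resource_id = int(part)
--
--     return resource_type, resource_id
-- ===== SOURCE B (Python) =====
-- def _extract_resource_info(path: str) -> tuple:
--     """Extract resource type and ID from URL path."""
--     parts = path.strip("/").split("/")
--
--     resource_map = {
--         "documents": "document",
--         "repositories": "repository",
--         "code-components": "code_component",
--         "initiatives": "initiative",
--         "ontology": "ontology",
--         "users": "user",
--         "webhooks": "system",
--         "tasks": "task",
--         "login": "auth",
--     }
--
--     # scan from the right and stop at the first hit: "last wins" becomes
--     # "first found when walking backwards", with early exit.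
--     resource_type = next(
--         (resource_map[p] for p in reversed(parts) if p in resource_map),
--         "unknown",
--     )
--     resource_id = next(
--         (int(p) for p in reversed(parts) if p.isdigit()),
--         None,
--     )
--     return resource_type, resource_id
-- ===== Notes on version B (the rewrite author's own statement) =====
-- stated objective: idiomatic
-- what changed: Replaces A's full left-to-right loop that keeps overwriting both fields with two right-to-left searches (next over reversed(parts)) that each stop at the first hit, so the last matching segment is found as the first hit when walking backwards.
import Mathlib
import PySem

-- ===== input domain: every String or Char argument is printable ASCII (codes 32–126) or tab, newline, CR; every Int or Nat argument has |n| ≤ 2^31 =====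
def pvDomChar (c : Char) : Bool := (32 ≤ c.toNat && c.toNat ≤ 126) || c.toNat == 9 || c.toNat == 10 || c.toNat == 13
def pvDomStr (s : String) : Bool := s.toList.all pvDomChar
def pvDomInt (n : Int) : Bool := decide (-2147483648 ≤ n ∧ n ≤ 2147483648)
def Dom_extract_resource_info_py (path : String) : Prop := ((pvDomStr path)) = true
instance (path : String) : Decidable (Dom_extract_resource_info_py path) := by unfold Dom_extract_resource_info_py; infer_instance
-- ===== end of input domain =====

-- B replaces A's full left-to-right loop that overwrites both fields with two
-- short-circuiting right-to-left searches (next over reversed(parts)).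

-- the dict literal both sources contain (unique keys, so first-match List.lookup = dict lookup)
def pvResourceMap : List (String × String) :=
  [("documents", "document"), ("repositories", "repository"),
   ("code-components", "code_component"), ("initiatives", "initiative"),
   ("ontology", "ontology"), ("users", "user"), ("webhooks", "system"),
   ("tasks", "task"), ("login", "auth")]

-- ===== PORT A =====
-- A's loop body: 'if part in resource_map: … elif part.isdigit(): …'
-- part.isdigit() guarantees int(part) succeeds on ASCII, so '(ofStr? part).getD 0' is exact there.
def pvStepA (st : String × Option Int) (part : String) : String × Option Int :=
  match List.lookup part pvResourceMap with
  | some t => (t, st.2)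
  | none =>
    if PySem.Str.strIsdigit part then (st.1, some ((PySem.Int.ofStr? part).getD 0))
    else st

def extract_resource_info_py (path : String) : String × Option Int :=
  -- parts = path.strip("/").split("/"); sep "/" ≠ "" so split? is always some: getD [] is exact
  let parts := (PySem.Str.split? (PySem.Str.stripChars path "/") "/").getD []
  parts.foldl pvStepA ("unknown", none)

-- ===== PORT B =====
def extract_resource_info_py_alt (path : String) : String × Option Int :=
  let parts := (PySem.Str.split? (PySem.Str.stripChars path "/") "/").getD []
  let rparts := parts.reverse
  -- next((resource_map[p] for p in reversed(parts) if p in resource_map), "unknown")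
  let resource_type := (rparts.findSome? (fun p => List.lookup p pvResourceMap)).getD "unknown"
  -- next((int(p) for p in reversed(parts) if p.isdigit()), None)
  let resource_id := (rparts.find? (fun p => PySem.Str.strIsdigit p)).map
      (fun p => (PySem.Int.ofStr? p).getD 0)
  (resource_type, resource_id)

-- ===== PRECONDITION & SPEC =====
def Spec_extract_resource_info_py (path : String) (out : String × Option Int) : Prop := out = extract_resource_info_py_alt path
instance (path : String) (out : String × Option Int) : Decidable (Spec_extract_resource_info_py path out) := by unfold Spec_extract_resource_info_py; infer_instance

-- ===== CLAIM (what is proved, stated in full; the proofs are below) =====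
def Claim_equal_extract_resource_info_py : Prop := ∀ (path : String), Dom_extract_resource_info_py path → Spec_extract_resource_info_py path (extract_resource_info_py path)

-- ===== LEMMAS AND PROOFS =====

theorem pv_getD_or {α : Type} (x y : Option α) (a : α) :
    (Option.or x y).getD a = x.getD (y.getD a) := by
  cases x <;> rfl

theorem pv_map_or {α β : Type} (g : α → β) (x y : Option α) :
    (Option.or x y).map g = Option.or (x.map g) (y.map g) := by
  cases x <;> rfl

theorem pv_or_some_or {α : Type} (x : Option α) (a : α) (b : Option α) :
    Option.or (Option.or x (some a)) b = Option.or x (some a) := by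
  cases x <;> rfl

-- no key of the resource map is an all-digit string
theorem pv_lookup_none_of_digit (p : String) (hd : PySem.Str.strIsdigit p = true) :
    List.lookup p pvResourceMap = none := by
  have h1 : p ≠ "documents" := by rintro rfl; exact absurd hd (by decide)
  have h2 : p ≠ "repositories" := by rintro rfl; exact absurd hd (by decide)
  have h3 : p ≠ "code-components" := by rintro rfl; exact absurd hd (by decide)
  have h4 : p ≠ "initiatives" := by rintro rfl; exact absurd hd (by decide)
  have h5 : p ≠ "ontology" := by rintro rfl; exact absurd hd (by decide)
  have h6 : p ≠ "users" := by rintro rfl; exact absurd hd (by decide)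
  have h7 : p ≠ "webhooks" := by rintro rfl; exact absurd hd (by decide)
  have h8 : p ≠ "tasks" := by rintro rfl; exact absurd hd (by decide)
  have h9 : p ≠ "login" := by rintro rfl; exact absurd hd (by decide)
  have b1 : (p == "documents") = false := by simp [h1]
  have b2 : (p == "repositories") = false := by simp [h2]
  have b3 : (p == "code-components") = false := by simp [h3]
  have b4 : (p == "initiatives") = false := by simp [h4]
  have b5 : (p == "ontology") = false := by simp [h5]
  have b6 : (p == "users") = false := by simp [h6]
  have b7 : (p == "webhooks") = false := by simp [h7]
  have b8 : (p == "tasks") = false := by simp [h8]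
  have b9 : (p == "login") = false := by simp [h9]
  simp only [pvResourceMap, List.lookup, b1, b2, b3, b4, b5, b6, b7, b8, b9]

-- loop invariant: A's forward fold from any start state equals B's two backwards
-- first-hit searches, with the start state as the not-found default
theorem pv_fold_eq (parts : List String) (a : String) (b : Option Int) :
    parts.foldl pvStepA (a, b) =
      ((parts.reverse.findSome? (fun p => List.lookup p pvResourceMap)).getD a,
       Option.or ((parts.reverse.find? (fun p => PySem.Str.strIsdigit p)).map
           (fun p => (PySem.Int.ofStr? p).getD 0)) b) := by
  induction parts generalizing a b with
  | nil => rfl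
  | cons p ps ih =>
    simp only [List.foldl_cons, List.reverse_cons, List.findSome?_append, List.find?_append]
    cases hl : List.lookup p pvResourceMap with
    | some t =>
      have hd : PySem.Str.strIsdigit p = false := by
        cases h : PySem.Str.strIsdigit p with
        | false => rfl
        | true => rw [pv_lookup_none_of_digit p h] at hl; cases hl
      simp only [pvStepA, hl, ih, List.findSome?, List.find?, hd, pv_getD_or,
        Option.getD_some, Option.or_none]
    | none =>
      cases hd : PySem.Str.strIsdigit p with
      | true =>
        simp only [pvStepA, hl, hd, if_true, ih, List.findSome?, List.find?,
          Option.or_none, pv_map_or, Option.map_some, pv_or_some_or]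
      | false =>
        simp only [pvStepA, hl, hd, Bool.false_eq_true, if_false, ih, List.findSome?,
          List.find?, Option.or_none]

-- ===== VERDICT (by name: the statement is the Claim_ definition above) =====
theorem extract_resource_info_py_spec : Claim_equal_extract_resource_info_py := by
  intro path _
  unfold Spec_extract_resource_info_py extract_resource_info_py extract_resource_info_py_alt
  rw [pv_fold_eq]
  simp only [Option.or_none]
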